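-- pv_equiv track=rewrite | github.com/Sunghwan7330/algorithm_example | codility/01_Iterations/BinaryGap/main.py | solution
-- ===== SOURCE A (Python) =====
-- def solution(N):
--
--     long_gap = 0
--     gap_count = 0
--     mask = 1
--     count_flag = False
--
--     while N > 0:
--         if N & mask == 1:
--             if gap_count > long_gap:
--                 long_gap = gap_count
--             gap_count = 0
--             count_flag = True
--         else:
--             if count_flag:
--                 gap_count += 1
--
--         N = N >> 1
--     return long_gap
-- ===== SOURCE B (Python) =====
-- def solution(N):
--     if N <= 0:
--         return 0
--     parts = bin(N)[2:].split('1')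
--     # parts[0] is empty (no leading zeros), parts[-1] is the trailing zeros
--     # that never lie between two ones; the interior parts are the gaps.
--     return max((len(p) for p in parts[1:-1]), default=0)
-- ===== Notes on version B (the rewrite author's own statement) =====
-- stated objective: idiomatic
-- what changed: Replaces the bit-by-bit masking/shifting loop with state flags by building the binary string once and splitting it on '1': the interior parts are exactly the zero gaps, so the answer is the max of their lengths.
import Mathlib
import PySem

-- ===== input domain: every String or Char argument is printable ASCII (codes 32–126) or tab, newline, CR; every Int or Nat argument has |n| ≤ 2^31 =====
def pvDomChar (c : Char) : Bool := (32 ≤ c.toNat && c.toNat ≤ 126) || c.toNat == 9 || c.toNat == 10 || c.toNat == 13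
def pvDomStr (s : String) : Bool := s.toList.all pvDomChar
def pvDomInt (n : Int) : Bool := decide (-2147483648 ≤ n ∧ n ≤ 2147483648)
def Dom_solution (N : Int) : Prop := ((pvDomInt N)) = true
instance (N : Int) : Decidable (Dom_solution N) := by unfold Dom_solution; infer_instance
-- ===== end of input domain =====

-- B replaces A's bit-masking loop by splitting the binary string on '1' and taking
-- the maximal interior part length (more idiomatic, same O(log N) cost).


-- ===== PORT A =====
-- N >> 1 (Python arithmetic shift); this lemma is cited by solLoop's decreasing_by
theorem shiftRight_one (N : Int) : N >>> (1:Nat) = N / 2 := by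
  have := Int.shiftRight_eq_div_pow N 1
  simpa using this

-- the while loop of A, state = (N, long_gap, gap_count, count_flag)
def solLoop (N long gap : Int) (flag : Bool) : Int :=
  if _h : N > 0 then
    if PySem.Int.band N 1 = 1 then
      solLoop (N >>> (1:Nat)) (if gap > long then gap else long) 0 true
    else
      solLoop (N >>> (1:Nat)) long (if flag then gap + 1 else gap) flag
  else
    long
termination_by N.toNat
decreasing_by all_goals (rw [shiftRight_one]; omega)

def solution (N : Int) : Int := solLoop N 0 0 false

-- ===== PORT B =====
-- bin(n)[2:] for n ≥ 1, as a char list (MSB first); exact for positive n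
def binChars (n : Nat) : List Char :=
  if _h : n = 0 then [] else binChars (n / 2) ++ [if n % 2 = 1 then '1' else '0']
decreasing_by omega

-- str.split('1') on a char list: Python's split with a one-char separator (exact)
def split1 : List Char → List (List Char)
  | [] => [[]]
  | c :: rest =>
    if c = '1' then [] :: split1 rest
    else
      match split1 rest with
      | [] => [[c]]          -- unreachable: split1 never returns []
      | h :: t => (c :: h) :: t

def solution_alt (N : Int) : Int :=
  if N ≤ 0 then 0
  else
    let parts := split1 (binChars N.toNat)
    -- parts[1:-1] (exact: drop the first element, then the last)
    let interior := (parts.drop 1).dropLast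
    let lens := interior.map (fun p => (p.length : Int))
    -- max(..., default=0)
    match lens with
    | [] => 0
    | h :: t => t.foldl max h

-- ===== PRECONDITION & SPEC =====
def Spec_solution (N : Int) (out : Int) : Prop := out = solution_alt N
instance (N : Int) (out : Int) : Decidable (Spec_solution N out) := by unfold Spec_solution; infer_instance

-- ===== CLAIM (what is proved, stated in full; the proofs are below) =====
def Claim_equal_solution : Prop := ∀ (N : Int), Dom_solution N → Spec_solution N (solution N)

-- ===== LEMMAS AND PROOFS =====

-- 2-adic valuation (number of trailing binary zeros) of n
def v2 (n : Nat) : Nat :=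
  if _h : n = 0 ∨ n % 2 = 1 then 0 else v2 (n / 2) + 1
decreasing_by omega

-- the list of zero-gap lengths strictly between ones of n, MSB-side first
def Pz (n : Nat) : List Nat :=
  if _h : n ≤ 1 then []
  else if n % 2 = 1 then Pz (n / 2) ++ [v2 (n / 2)] else Pz (n / 2)
decreasing_by all_goals omega

-- the maximal gap
def Gm (n : Nat) : Nat := (Pz n).foldr max 0

theorem v2_even {n : Nat} (h0 : n ≠ 0) (h2 : n % 2 = 0) : v2 n = v2 (n / 2) + 1 := by
  rw [v2]; simp [h0, h2]

theorem v2_odd {n : Nat} (h2 : n % 2 = 1) : v2 n = 0 := by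
  rw [v2]; simp [h2]

theorem Pz_even {n : Nat} (h1 : 1 < n) (h2 : n % 2 = 0) : Pz n = Pz (n / 2) := by
  rw [Pz]; simp [Nat.not_le.mpr h1, h2]

theorem Pz_odd {n : Nat} (h1 : 1 < n) (h2 : n % 2 = 1) : Pz n = Pz (n / 2) ++ [v2 (n / 2)] := by
  rw [Pz]; simp [Nat.not_le.mpr h1, h2]

theorem foldr_max_init (L : List Nat) (a : Nat) : L.foldr max a = max (L.foldr max 0) a := by
  induction L with
  | nil => simp
  | cons x t ih => simp [List.foldr, ih, Nat.max_assoc]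

theorem Gm_even {n : Nat} (h1 : 1 < n) (h2 : n % 2 = 0) : Gm n = Gm (n / 2) := by
  simp [Gm, Pz_even h1 h2]

theorem Gm_odd {n : Nat} (h1 : 1 < n) (h2 : n % 2 = 1) :
    Gm n = max (Gm (n / 2)) (v2 (n / 2)) := by
  unfold Gm
  rw [Pz_odd h1 h2, List.foldr_append]
  show (Pz (n / 2)).foldr max (max (v2 (n / 2)) 0) = _
  rw [Nat.max_zero, foldr_max_init]

-- ---- A-side: characterisation of the loop ----

theorem shift_natCast (n : Nat) : ((n : Int) >>> (1:Nat)) = ((n / 2 : Nat) : Int) := by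
  rw [shiftRight_one]
  omega

theorem band_natCast_one (n : Nat) : PySem.Int.band (n : Int) 1 = ((n % 2 : Nat) : Int) := by
  have : (1 : Int) = ((1 : Nat) : Int) := rfl
  rw [this, PySem.Int.band_natCast]
  congr 1
  simp [Nat.and_one_is_mod]

theorem loopTrue (n : Nat) (hn : 1 ≤ n) : ∀ l k : Int, 0 ≤ k →
    solLoop (n : Int) l k true = max l (max (k + v2 n) (Gm n)) := by
  induction n using Nat.strong_induction_on with
  | _ n ih =>
    intro l k hk
    rw [solLoop]
    have hpos : (n : Int) > 0 := by exact_mod_cast hn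
    rcases Nat.even_or_odd n with he | ho
    · -- n even, so n ≥ 2
      have h2 : n % 2 = 0 := Nat.even_iff.mp he
      have h1 : 1 < n := by omega
      simp only [hpos, dif_pos, band_natCast_one, h2, shift_natCast]
      have : ((0 : Nat) : Int) ≠ 1 := by decide
      rw [if_neg this]
      simp only [if_pos]
      rw [ih (n / 2) (by omega) (by omega) l (k + 1) (by omega)]
      rw [v2_even (by omega) h2, Gm_even h1 h2]
      push_cast
      omega
    · have h2 : n % 2 = 1 := Nat.odd_iff.mp ho
      simp only [hpos, dif_pos, band_natCast_one, h2, shift_natCast]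
      rw [if_pos (by norm_num)]
      by_cases h1 : n = 1
      · subst h1
        rw [solLoop]
        simp [v2_odd h2, Gm, Pz]
        omega
      · rw [ih (n / 2) (by omega) (by omega) _ 0 (by omega)]
        rw [v2_odd h2, Gm_odd (by omega) h2]
        push_cast
        omega

theorem loopFalse (n : Nat) (hn : 1 ≤ n) : solLoop (n : Int) 0 0 false = (Gm n : Int) := by
  induction n using Nat.strong_induction_on with
  | _ n ih =>
    rw [solLoop]
    have hpos : (n : Int) > 0 := by exact_mod_cast hn
    rcases Nat.even_or_odd n with he | ho
    · have h2 : n % 2 = 0 := Nat.even_iff.mp he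
      have h1 : 1 < n := by omega
      simp only [hpos, dif_pos, band_natCast_one, h2, shift_natCast]
      have : ((0 : Nat) : Int) ≠ 1 := by decide
      rw [if_neg this]
      simp only [Bool.false_eq_true, if_false]
      rw [ih (n / 2) (by omega) (by omega), Gm_even h1 h2]
    · have h2 : n % 2 = 1 := Nat.odd_iff.mp ho
      simp only [hpos, dif_pos, band_natCast_one, h2, shift_natCast]
      rw [if_pos (by norm_num)]
      by_cases h1 : n = 1
      · subst h1
        rw [solLoop]
        simp [Gm, Pz]
      · rw [if_neg (by omega)]
        rw [loopTrue (n / 2) (by omega) _ 0 (by omega)]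
        rw [Gm_odd (by omega) h2]
        push_cast
        omega

-- ---- B-side: characterisation of the split ----

theorem split1_ne (s : List Char) : split1 s ≠ [] := by
  induction s with
  | nil => simp [split1]
  | cons c r ih =>
    simp only [split1]
    split_ifs
    · simp
    · cases h : split1 r <;> simp

theorem split1_one (s : List Char) : split1 (s ++ ['1']) = split1 s ++ [[]] := by
  induction s with
  | nil => rfl
  | cons c r ih =>
    by_cases hc : c = '1'
    · simp only [List.cons_append, split1, if_pos hc, ih]
    · simp only [List.cons_append, split1, if_neg hc, ih]
      cases h : split1 r with
      | nil => exact absurd h (split1_ne r)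
      | cons a t => simp

theorem split1_zero (s : List Char) :
    split1 (s ++ ['0']) = (split1 s).dropLast ++ [(split1 s).getLastD [] ++ ['0']] := by
  induction s with
  | nil => rfl
  | cons c r ih =>
    cases h : split1 r with
    | nil => exact absurd h (split1_ne r)
    | cons a t =>
      rw [h] at ih
      by_cases hc : c = '1'
      · simp only [List.cons_append, split1, if_pos hc, ih, h]
        cases t <;> simp
      · simp only [List.cons_append, split1, if_neg hc, ih, h]
        cases t <;> simp

-- structure of the split binary string: leading empty part, the gaps, trailing zeros
theorem split_binChars (n : Nat) (hn : 1 ≤ n) :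
    split1 (binChars n) =
      [] :: ((Pz n).map (fun k => List.replicate k '0')) ++ [List.replicate (v2 n) '0'] := by
  induction n using Nat.strong_induction_on with
  | _ n ih =>
    rcases Nat.even_or_odd n with he | ho
    · have h2 : n % 2 = 0 := Nat.even_iff.mp he
      have h1 : 1 < n := by omega
      rw [binChars]
      simp only [dif_neg (by omega : ¬ n = 0), h2]
      rw [if_neg (by omega)]
      rw [split1_zero, ih (n / 2) (by omega) (by omega)]
      rw [Pz_even h1 h2, v2_even (by omega) h2]
      rw [List.dropLast_concat, List.getLastD_concat]
      simp [List.replicate_succ']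
    · have h2 : n % 2 = 1 := Nat.odd_iff.mp ho
      rw [binChars]
      simp only [dif_neg (by omega : ¬ n = 0), h2]
      rw [if_pos trivial]
      rw [split1_one]
      by_cases h1 : n = 1
      · subst h1
        simp [binChars, split1, Pz, v2]
      · rw [ih (n / 2) (by omega) (by omega)]
        rw [Pz_odd (by omega) h2, v2_odd h2]
        simp
    
-- fold-max bookkeeping
theorem foldl_max_nat (t : List Nat) (h : Nat) : t.foldl max h = max h (t.foldr max 0) := by
  induction t generalizing h with
  | nil => simp
  | cons a t ih => simp [List.foldl, List.foldr, ih, Nat.max_assoc]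

theorem foldl_max_cast (t : List Nat) (h : Nat) :
    (t.map (fun x : Nat => (x : Int))).foldl max (h : Int) = ((t.foldl max h : Nat) : Int) := by
  induction t generalizing h with
  | nil => rfl
  | cons a t ih =>
    simp only [List.map_cons, List.foldl_cons]
    rw [← Nat.cast_max, ih]

theorem alt_eq_Gm (n : Nat) (hn : 1 ≤ n) : solution_alt (n : Int) = (Gm n : Int) := by
  unfold solution_alt
  rw [if_neg (by omega : ¬ ((n : Int) ≤ 0))]
  simp only [Int.toNat_natCast]
  rw [split_binChars n hn]
  rw [show ([] :: ((Pz n).map (fun k => List.replicate k '0')) ++ [List.replicate (v2 n) '0']).drop 1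
        = ((Pz n).map (fun k => List.replicate k '0')) ++ [List.replicate (v2 n) '0'] by simp]
  rw [List.dropLast_concat]
  cases h : Pz n with
  | nil => simp [Gm, h]
  | cons a t =>
    simp only [List.map_cons, List.map_map]
    have hcomp : ((fun p => ((p : List Char).length : Int)) ∘ fun k => List.replicate k '0')
        = fun x : Nat => (x : Int) := by
      funext x; simp
    rw [hcomp]
    simp only [List.length_replicate]
    rw [foldl_max_cast]
    rw [foldl_max_nat]
    simp [Gm, h]

-- ===== VERDICT (by name: the statement is the Claim_ definition above) =====
theorem solution_spec : Claim_equal_solution := by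
  intro N _
  unfold Spec_solution solution
  by_cases h : N ≤ 0
  · rw [solLoop]
    rw [dif_neg (by omega)]
    unfold solution_alt
    rw [if_pos h]
  · have hn : 1 ≤ N.toNat := by omega
    have hN : N = (N.toNat : Int) := by omega
    rw [hN, loopFalse N.toNat hn, alt_eq_Gm N.toNat hn]
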